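-- pv_equiv track=rewrite | github.com/ftakanashi/JobProjects | 牛客笔试真题/华为机试题库/HJ77.火车进站/main.py | process
-- ===== SOURCE A (Python) =====
-- def process(trains):
--     res = []
--     n = len(trains)
--
--     def dfs(pos, stack, subres):
--         if pos == n:    # 终止dfs时别忘了将stack中剩余内容倒序加到subres中去形成完整结果。
--             res.append(subres + list(reversed(stack)))
--             return
--
--         # 直接将当前元素入栈，此时不需要栈pop
--         dfs(pos + 1, stack + [trains[pos]], subres)
--
--         popped = []    # 构建popped数组，这是为了下面可以方便地构造新subres
--         while stack:
--             popped.append(stack.pop())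
--             dfs(pos + 1, stack + [trains[pos]], subres + popped)
--
--     dfs(0, [], [])
--     return res
-- ===== SOURCE B (Python) =====
-- def process(trains):
--     n = len(trains)
--     res = []
--
--     def dfs(i, stack, out):
--         if i == n and not stack:
--             res.append(out)
--             return
--         if i < n:
--             dfs(i + 1, stack + [trains[i]], out)
--         if stack:
--             dfs(i, stack[:-1], out + [stack[-1]])
--
--     dfs(0, [], [])
--     return res
-- ===== Notes on version B (the rewrite author's own statement) =====
-- stated objective: simpler
-- what changed: A's dfs pushes, then runs an inner while loop popping k=1..len(stack) elements before each further recursion and flushes the leftover stack at the end; B is the standard binary push/pop DFS (one push branch, one single-pop branch, emit when i==n and the stack is empty), which removes the inner loop, the popped accumulator and the end-of-input flush.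
import Mathlib
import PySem

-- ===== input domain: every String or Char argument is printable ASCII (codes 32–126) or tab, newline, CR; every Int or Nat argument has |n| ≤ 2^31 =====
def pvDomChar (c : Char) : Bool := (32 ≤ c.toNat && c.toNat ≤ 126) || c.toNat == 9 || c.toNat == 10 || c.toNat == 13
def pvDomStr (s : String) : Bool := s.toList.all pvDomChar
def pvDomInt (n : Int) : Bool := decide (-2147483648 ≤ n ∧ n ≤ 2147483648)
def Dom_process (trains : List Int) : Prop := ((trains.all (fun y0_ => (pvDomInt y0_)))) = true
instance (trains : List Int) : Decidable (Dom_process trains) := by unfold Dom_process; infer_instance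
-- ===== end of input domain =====

-- B replaces A's inner pop-k while loop by the standard binary push/pop DFS: simpler decomposition, same output order.

-- ===== PORT A =====
-- A's dfs with its inner `while stack` pop loop; stack.pop() pops the LAST element,
-- rendered functionally as getLast/dropLast.  The `pos ≥ n` guard is Python's `pos == n`
-- (pos never exceeds n on any reachable call); trains.getD pos 0 is trains[pos], exact since pos < n there.
mutual
  def dfsA (trains : List Int) (n : Nat) (pos : Nat) (stack subres : List Int) : List (List Int) :=
    if pos ≥ n then [subres ++ stack.reverse]
    else
      dfsA trains n (pos + 1) (stack ++ [trains.getD pos 0]) subres ++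
      popLoopA trains n pos stack [] subres
  termination_by (n - pos, stack.length + 1)
  decreasing_by
    · apply Prod.Lex.left; omega
    · apply Prod.Lex.right; omega
  -- the `while stack:` loop of A, with accumulator `popped`; guard `pos < n` only makes it total (always true on reachable calls)
  def popLoopA (trains : List Int) (n : Nat) (pos : Nat) (stack popped subres : List Int) : List (List Int) :=
    if _hpos : pos < n then
      if h : stack = [] then []
      else
        dfsA trains n (pos + 1) (stack.dropLast ++ [trains.getD pos 0]) (subres ++ (popped ++ [stack.getLast h])) ++
        popLoopA trains n pos stack.dropLast (popped ++ [stack.getLast h]) subres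
    else []
  termination_by (n - pos, stack.length)
  decreasing_by
    · apply Prod.Lex.left; omega
    · apply Prod.Lex.right; have := List.length_pos_of_ne_nil h; simp [List.length_dropLast]; omega
end

def process (trains : List Int) : List (List Int) :=
  dfsA trains trains.length 0 [] []

-- ===== PORT B =====
-- B's binary DFS: emit when i == n and the stack is empty; push branch, then pop branch.
def dfsB (trains : List Int) (n : Nat) (i : Nat) (stack out : List Int) : List (List Int) :=
  if i = n ∧ stack = [] then [out]
  else
    (if i < n then dfsB trains n (i + 1) (stack ++ [trains.getD i 0]) out else []) ++
    (if h : stack = [] then [] else dfsB trains n i stack.dropLast (out ++ [stack.getLast h]))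
termination_by (n - i, stack.length)
decreasing_by
  · apply Prod.Lex.left; omega
  · apply Prod.Lex.right; have := List.length_pos_of_ne_nil h; simp [List.length_dropLast]; omega

def process_alt (trains : List Int) : List (List Int) :=
  dfsB trains trains.length 0 [] []

-- ===== PRECONDITION & SPEC =====
def Spec_process (trains : List Int) (out : List (List Int)) : Prop := out = process_alt trains
instance (trains : List Int) (out : List (List Int)) : Decidable (Spec_process trains out) := by unfold Spec_process; infer_instance

-- ===== CLAIM (what is proved, stated in full; the proofs are below) =====
def Claim_equal_process : Prop := ∀ (trains : List Int), Dom_process trains → Spec_process trains (process trains)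

-- ===== LEMMAS AND PROOFS =====

-- At i = n, B's DFS just pops the whole stack and emits out ++ stack.reverse.
lemma dfsB_at_n (trains : List Int) (n : Nat) :
    ∀ stack out : List Int, dfsB trains n n stack out = [out ++ stack.reverse] := by
  intro stack
  induction stack using List.reverseRecOn with
  | nil => intro out; rw [dfsB]; simp
  | append_singleton s' x ih =>
    intro out
    rw [dfsB]
    simp [ih]

-- A's pop loop equals one pop step of B's DFS (given equivalence at i+1).
lemma popLoopA_eq (trains : List Int) (n i : Nat) (hin : i < n)
    (IH : ∀ s o : List Int, dfsB trains n (i + 1) s o = dfsA trains n (i + 1) s o) :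
    ∀ stack popped subres : List Int,
      popLoopA trains n i stack popped subres =
        if h : stack = [] then []
        else dfsB trains n i stack.dropLast ((subres ++ popped) ++ [stack.getLast h]) := by
  intro stack
  induction stack using List.reverseRecOn with
  | nil => intro popped subres; rw [popLoopA]; simp [hin]
  | append_singleton s' x ih =>
    intro popped subres
    rw [popLoopA]
    simp only [hin, dif_pos, List.dropLast_concat, List.getLast_concat]
    have hne : ¬ (s' ++ [x] = []) := by simp
    rw [dif_neg hne]
    conv_rhs => rw [dfsB]
    have hin' : ¬ (i = n ∧ s' = []) := by
      intro ⟨h1, _⟩; omega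
    rw [if_neg hin', if_pos hin]
    rw [ih (popped ++ [x]) subres]
    simp [IH, List.append_assoc]

lemma dfsB_eq_dfsA (trains : List Int) (n : Nat) :
    ∀ k i, i ≤ n → n - i ≤ k →
      ∀ stack out : List Int, dfsB trains n i stack out = dfsA trains n i stack out := by
  intro k
  induction k with
  | zero =>
    intro i hi hk stack out
    have : i = n := by omega
    subst this
    rw [dfsB_at_n, dfsA]
    simp
  | succ k ih =>
    intro i hi hk stack out
    by_cases hin : i = n
    · subst hin
      rw [dfsB_at_n, dfsA]
      simp
    · have hlt : i < n := by omega
      rw [dfsB, dfsA]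
      have hcond : ¬ (i = n ∧ stack = []) := by intro ⟨h1, _⟩; exact hin h1
      rw [if_neg hcond, if_neg (by omega : ¬ i ≥ n), if_pos hlt]
      have IH : ∀ s o : List Int, dfsB trains n (i + 1) s o = dfsA trains n (i + 1) s o :=
        fun s o => ih (i + 1) (by omega) (by omega) s o
      rw [IH, popLoopA_eq trains n i hlt IH stack [] out]
      simp

-- ===== VERDICT (by name: the statement is the Claim_ definition above) =====
theorem process_spec : Claim_equal_process := by
  intro trains _
  unfold Spec_process process process_alt
  exact (dfsB_eq_dfsA trains trains.length trains.length 0 (by omega) (by omega) [] []).symm
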